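-- pv_equiv track=rewrite | github.com/behruzgurbanli/nlp_corpora_and_algorithms_in_kazakh_language | src/nlp_project/p2/task4_dot_lr.py | _word_after
-- ===== SOURCE A (Python) =====
-- def _word_after(text: str, idx: int) -> str:
--     j = idx + 1
--     while j < len(text) and text[j].isspace():
--         j += 1
--     start = j
--     while j < len(text) and text[j].isalpha():
--         j += 1
--     end = j
--     if start < end:
--         return text[start:end].lower()
--     return "<NONE>"
-- ===== SOURCE B (Python) =====
-- def _word_after(text: str, idx: int) -> str:
--     tail = text[idx + 1:].lstrip()
--     word = []
--     for ch in tail: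
--         if not ch.isalpha():
--             break
--         word.append(ch)
--     return ''.join(word).lower() if word else "<NONE>"
-- ===== Notes on version B (the rewrite author's own statement) =====
-- stated objective: simpler
-- what changed: Replaces the two index-based while loops with a slice + lstrip (C-level whitespace skip) and a single for/break scan collecting the leading alphabetic run, with no index arithmetic.
-- outside the precondition, e.g. on _word_after('ab cd', -3): A returns '', B returns 'cd'
import Mathlib
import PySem

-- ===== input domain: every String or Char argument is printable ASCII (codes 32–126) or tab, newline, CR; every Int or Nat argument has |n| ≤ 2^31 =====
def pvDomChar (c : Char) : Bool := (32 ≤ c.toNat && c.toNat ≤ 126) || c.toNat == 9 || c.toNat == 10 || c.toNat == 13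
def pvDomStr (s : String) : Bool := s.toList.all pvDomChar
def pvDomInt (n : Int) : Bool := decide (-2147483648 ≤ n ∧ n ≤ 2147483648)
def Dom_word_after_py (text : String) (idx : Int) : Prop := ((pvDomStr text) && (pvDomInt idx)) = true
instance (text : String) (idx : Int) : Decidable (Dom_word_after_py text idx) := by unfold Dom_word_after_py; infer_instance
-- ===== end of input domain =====

-- B replaces A's two index-based while loops by a slice + lstrip and a single
-- for/break scan over the characters (objective: simpler; equal return values).

-- ===== PORT A =====
-- one Python 'while j < len(text) and text[j].<p>(): j += 1' loop; fuel bounds the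
-- iteration count (the caller passes enough fuel for the loop to run to completion)
def waScan (p : Char → Bool) (cs : List Char) : Nat → Int → Int
  | 0, j => j
  | fuel + 1, j =>
    if j < (cs.length : Int) then
      match PySem.List.pyGet? cs j with
      | some c => if p c then waScan p cs fuel (j + 1) else j
      | none => j
    else j

def word_after_py (text : String) (idx : Int) : String :=
  let cs := text.toList
  let start := waScan PySem.Chars.isspace cs ((cs.length : Int) - (idx + 1)).toNat (idx + 1)
  let e := waScan PySem.Chars.isalpha cs ((cs.length : Int) - start).toNat start
  if start < e then
    String.ofList (PySem.Chars.lower (PySem.List.slice cs (some start) (some e)))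
  else "<NONE>"

-- ===== PORT B =====
-- the 'for ch in tail: if not ch.isalpha(): break; word.append(ch)' loop
def altCollect : List Char → List Char
  | [] => []
  | c :: rest => if PySem.Chars.isalpha c then c :: altCollect rest else []

def word_after_py_alt (text : String) (idx : Int) : String :=
  let tail := PySem.Str.lstrip (PySem.Str.slice text (some (idx + 1)) none)
  let word := altCollect tail.toList
  if word = [] then "<NONE>" else PySem.Str.lower (String.ofList word)

-- ===== PRECONDITION & SPEC =====
-- Pre_ excludes idx ≤ -2, where A's j = idx+1 is a negative Python index: A either
-- raises IndexError (idx+1 < -len) or scans via wraparound indices, an accident of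
-- A's implementation that can even yield '' from an empty wrapped slice, while B's
-- tail slice text[idx+1:] reads only the end of the string.
def Pre_word_after_py (text : String) (idx : Int) : Prop := -1 ≤ idx
instance (text : String) (idx : Int) : Decidable (Pre_word_after_py text idx) := by unfold Pre_word_after_py; infer_instance
def pvWitness_word_after_py : String × Int := ("a Word.", 0)
def Spec_word_after_py (text : String) (idx : Int) (out : String) : Prop := out = word_after_py_alt text idx
instance (text : String) (idx : Int) (out : String) : Decidable (Spec_word_after_py text idx out) := by unfold Spec_word_after_py; infer_instance

-- ===== CLAIM (what is proved, stated in full; the proofs are below) =====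
def Claim_equal_word_after_py : Prop := ∀ (text : String) (idx : Int), Dom_word_after_py text idx → Pre_word_after_py text idx → Spec_word_after_py text idx (word_after_py text idx)

-- ===== LEMMAS AND PROOFS =====

-- A's scanning loop started at a non-negative index k with sufficient fuel stops at
-- k + length of the leading run of p-characters of cs.drop k
theorem waScan_eq (p : Char → Bool) (cs : List Char) (fuel : Nat) :
    ∀ k : Nat, cs.length - k ≤ fuel →
      waScan p cs fuel (k : Int) = ((k + ((cs.drop k).takeWhile p).length : Nat) : Int) := by
  induction fuel with
  | zero =>
    intro k hk
    have hlen : cs.length ≤ k := by omega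
    simp [waScan, List.drop_eq_nil_of_le hlen]
  | succ fuel ih =>
    intro k hk
    by_cases hlt : k < cs.length
    · have hget : PySem.List.pyGet? cs (k : Int) = some cs[k] := by
        rw [PySem.List.pyGet?_natCast]
        simp [List.getElem?_eq_getElem hlt]
      have hdrop : cs.drop k = cs[k] :: cs.drop (k + 1) := List.drop_eq_getElem_cons hlt
      by_cases hp : p cs[k]
      · have hstep : waScan p cs (fuel + 1) (k : Int) = waScan p cs fuel ((k : Int) + 1) := by
          simp [waScan, hp, hlt]
        rw [hstep, show ((k : Int) + 1) = ((k + 1 : Nat) : Int) by push_cast; ring,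
          ih (k + 1) (by omega), hdrop, List.takeWhile_cons, if_pos hp, List.length_cons]
        push_cast; ring
      · rw [hdrop, List.takeWhile_cons, if_neg hp]
        simp [waScan, hp, hlt]
    · have hle : cs.length ≤ k := by omega
      simp [waScan, List.drop_eq_nil_of_le hle, hlt]

theorem altCollect_eq (l : List Char) : altCollect l = l.takeWhile PySem.Chars.isalpha := by
  induction l with
  | nil => simp [altCollect]
  | cons c rest ih =>
    by_cases hc : PySem.Chars.isalpha c <;> simp [altCollect, hc, ih]

theorem drop_takeWhile_length (l : List Char) (p : Char → Bool) :
    l.drop (l.takeWhile p).length = l.dropWhile p := by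
  nth_rewrite 2 [← List.takeWhile_append_dropWhile (p := p) (l := l)]
  rw [List.drop_left]

theorem take_takeWhile_length (l : List Char) (p : Char → Bool) :
    l.take (l.takeWhile p).length = l.takeWhile p :=
  (List.prefix_iff_eq_take.mp (List.takeWhile_prefix p)).symm

-- ===== VERDICT (by name: the statement is the Claim_ definition above) =====
theorem word_after_py_spec : Claim_equal_word_after_py := by
  intro text idx _hdom hpre
  simp only [Spec_word_after_py, word_after_py, word_after_py_alt]
  have h0 : (0 : Int) ≤ idx + 1 := by unfold Pre_word_after_py at hpre; omega
  set cs := text.toList with hcs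
  set n := (idx + 1).toNat with hn
  have hidx : idx + 1 = (n : Int) := by omega
  -- the tail after skipping whitespace
  set t := cs.drop n with ht
  set w := (t.takeWhile PySem.Chars.isspace).length with hw
  set rest := t.dropWhile PySem.Chars.isspace with hrest
  set a := (rest.takeWhile PySem.Chars.isalpha).length with ha
  -- first loop
  have hwle : w ≤ t.length := List.IsPrefix.length_le (List.takeWhile_prefix _)
  have htlen : t.length = cs.length - n := by simp [ht]
  have hstart : waScan PySem.Chars.isspace cs ((cs.length : Int) - (idx + 1)).toNat (idx + 1)
      = ((n + w : Nat) : Int) := by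
    rw [hidx]
    exact waScan_eq _ _ _ n (by omega)
  rw [hstart]
  -- the second loop scans from n + w; cs.drop (n + w) = rest
  have hdrop2 : cs.drop (n + w) = rest := by
    have hsplit : cs.drop (n + w) = (cs.drop n).drop w := by
      rw [List.drop_drop, Nat.add_comm]
    rw [hsplit, ← ht, hw, drop_takeWhile_length]
  have hrlen : rest.length = t.length - w := by
    rw [hrest, ← drop_takeWhile_length]; simp [hw]
  have hend : waScan PySem.Chars.isalpha cs ((cs.length : Int) - ((n + w : Nat) : Int)).toNat ((n + w : Nat) : Int)
      = (((n + w) + a : Nat) : Int) := by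
    have := waScan_eq PySem.Chars.isalpha cs ((cs.length : Int) - ((n + w : Nat) : Int)).toNat (n + w) (by omega)
    rw [this, hdrop2]
  rw [hend]
  -- B's tail
  have htail : (PySem.Str.lstrip (PySem.Str.slice text (some (idx + 1)) none)).toList = rest := by
    rw [PySem.Str.toList_lstrip, PySem.Str.toList_slice, PySem.Chars.slice_eq_listSlice,
      PySem.List.slice_from _ h0]
    simp [PySem.Chars.lstrip, ← hcs, ← hn, ← ht, hrest]
  rw [htail, altCollect_eq]
  have hale : a ≤ rest.length := List.IsPrefix.length_le (List.takeWhile_prefix _)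
  by_cases hpos : 0 < a
  · have hlt : ((n + w : Nat) : Int) < (((n + w) + a : Nat) : Int) := by
      push_cast; omega
    have hne : rest.takeWhile PySem.Chars.isalpha ≠ [] := by
      intro h; rw [h] at ha; simp at ha; omega
    rw [if_pos hlt, if_neg hne]
    -- slice cs [n+w : n+w+a] = takeWhile isalpha rest
    have hsl : PySem.List.slice cs (some ((n + w : Nat) : Int)) (some (((n + w) + a : Nat) : Int))
        = rest.takeWhile PySem.Chars.isalpha := by
      rw [PySem.List.slice_natCast, Nat.add_sub_cancel_left, hdrop2, take_takeWhile_length]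
    rw [hsl]
    -- both sides are ofList of the same lowered list
    have : PySem.Str.lower (String.ofList (rest.takeWhile PySem.Chars.isalpha))
        = String.ofList (PySem.Chars.lower (rest.takeWhile PySem.Chars.isalpha)) := by
      rw [← String.ofList_toList (s := PySem.Str.lower (String.ofList (rest.takeWhile PySem.Chars.isalpha))),
        PySem.Str.toList_lower, String.toList_ofList]
    rw [this]
  · have ha0 : a = 0 := by omega
    have hnil : rest.takeWhile PySem.Chars.isalpha = [] := by
      rwa [← List.length_eq_zero_iff, ← ha]
    have hnlt : ¬ (((n + w : Nat) : Int) < (((n + w) + a : Nat) : Int)) := by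
      push_cast; omega
    rw [if_neg hnlt, if_pos hnil]
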